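-- pv_equiv track=rewrite | github.com/safersephy/TyTorch | tytorch/examples/models/CustomCNN.py | calculate_output_size
-- ===== SOURCE A (Python) =====
-- from typing import Any, Dict, Optional, Tuple
--
-- def calculate_output_size(
--
--     input_size: int,
--     num_conv_layers: int,
--     initial_filters: int,
--     growth_factor: int,
--     pool: bool = True,
-- ) -> Tuple[int, int]:
--     spatial_dim = input_size
--     filters = initial_filters
--
--     for i in range(num_conv_layers):
--         if growth_factor != 1:
--             filters = initial_filters * (growth_factor**i)
--
--         if pool:
--             spatial_dim //= 2
--
--     out_ch = filters
--     return out_ch, spatial_dim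
-- ===== SOURCE B (Python) =====
-- def calculate_output_size(
--     input_size: int,
--     num_conv_layers: int,
--     initial_filters: int,
--     growth_factor: int,
--     pool: bool = True,
-- ):
--     if num_conv_layers <= 0 or growth_factor == 1:
--         filters = initial_filters
--     else:
--         filters = initial_filters * growth_factor ** (num_conv_layers - 1)
--     if pool and num_conv_layers > 0:
--         spatial_dim = input_size // 2 ** num_conv_layers
--     else:
--         spatial_dim = input_size
--     return filters, spatial_dim
-- ===== Notes on version B (the rewrite author's own statement) =====
-- stated objective: faster
-- what changed: Replaced the per-layer loop with a closed-form computation: filters = initial_filters * growth_factor**(n-1) (guarded for n<=0 or growth_factor==1) and spatial_dim = input_size // 2**n when pooling; O(n) iterations become O(1) arithmetic.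
import Mathlib
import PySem

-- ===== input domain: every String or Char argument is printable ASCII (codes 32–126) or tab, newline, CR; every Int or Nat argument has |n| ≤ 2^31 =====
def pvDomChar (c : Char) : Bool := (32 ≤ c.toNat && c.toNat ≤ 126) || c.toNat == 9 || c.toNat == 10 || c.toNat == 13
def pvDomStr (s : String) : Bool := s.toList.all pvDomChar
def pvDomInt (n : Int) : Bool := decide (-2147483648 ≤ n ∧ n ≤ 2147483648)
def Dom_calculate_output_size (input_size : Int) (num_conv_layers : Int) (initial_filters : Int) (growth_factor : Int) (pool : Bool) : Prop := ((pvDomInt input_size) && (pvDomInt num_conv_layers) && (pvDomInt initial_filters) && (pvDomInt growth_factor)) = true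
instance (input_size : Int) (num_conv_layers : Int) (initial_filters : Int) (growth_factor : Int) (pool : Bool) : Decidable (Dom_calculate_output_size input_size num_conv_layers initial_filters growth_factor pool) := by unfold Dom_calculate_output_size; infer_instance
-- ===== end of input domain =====

-- ===== PORT A =====
-- B replaces A's per-layer loop by a closed-form computation of filters and spatial dim (objective: simpler).
def calculate_output_size (input_size : Int) (num_conv_layers : Int) (initial_filters : Int) (growth_factor : Int) (pool : Bool) : Int × Int :=
  let r := (PySem.List.pyRange 0 num_conv_layers 1).foldl
    (fun (st : Int × Int) (i : Int) =>
      let filters := if growth_factor ≠ 1 then initial_filters * growth_factor ^ i.toNat else st.2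
      let spatial := if pool then PySem.Int.floordiv st.1 2 else st.1
      (spatial, filters))
    (input_size, initial_filters)
  (r.2, r.1)

-- ===== PORT B =====
def calculate_output_size_alt (input_size : Int) (num_conv_layers : Int) (initial_filters : Int) (growth_factor : Int) (pool : Bool) : Int × Int :=
  let filters := if num_conv_layers ≤ 0 ∨ growth_factor = 1 then initial_filters
                 else initial_filters * growth_factor ^ (num_conv_layers - 1).toNat
  let spatial_dim := if pool = true ∧ 0 < num_conv_layers
                     then PySem.Int.floordiv input_size (2 ^ num_conv_layers.toNat)
                     else input_size
  (filters, spatial_dim)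

-- ===== PRECONDITION & SPEC =====
def Spec_calculate_output_size (input_size : Int) (num_conv_layers : Int) (initial_filters : Int) (growth_factor : Int) (pool : Bool) (out : Int × Int) : Prop := out = calculate_output_size_alt input_size num_conv_layers initial_filters growth_factor pool
instance (input_size : Int) (num_conv_layers : Int) (initial_filters : Int) (growth_factor : Int) (pool : Bool) (out : Int × Int) : Decidable (Spec_calculate_output_size input_size num_conv_layers initial_filters growth_factor pool out) := by unfold Spec_calculate_output_size; infer_instance

-- ===== CLAIM (what is proved, stated in full; the proofs are below) =====
def Claim_equal_calculate_output_size : Prop := ∀ (input_size : Int) (num_conv_layers : Int) (initial_filters : Int) (growth_factor : Int) (pool : Bool), Dom_calculate_output_size input_size num_conv_layers initial_filters growth_factor pool → Spec_calculate_output_size input_size num_conv_layers initial_filters growth_factor pool (calculate_output_size input_size num_conv_layers initial_filters growth_factor pool)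

-- ===== LEMMAS AND PROOFS =====

-- (x // d) // 2 = x // (2*d) for d > 0 (floor division).
theorem floordiv_floordiv_two (x d : Int) (hd : 0 < d) :
    PySem.Int.floordiv (PySem.Int.floordiv x d) 2 = PySem.Int.floordiv x (2 * d) := by
  rw [PySem.Int.floordiv_eq_ediv_of_pos hd, PySem.Int.floordiv_eq_ediv_of_pos (by omega : (0:Int) < 2),
      PySem.Int.floordiv_eq_ediv_of_pos (by omega : (0:Int) < 2 * d), Int.mul_comm 2 d]
  exact Int.ediv_ediv_of_nonneg (le_of_lt hd)

-- Characterisation of A's loop after m iterations.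
theorem loopA_char (input_size initial_filters growth_factor : Int) (pool : Bool) (m : Nat) :
    (PySem.List.pyRange 0 (m : Int) 1).foldl
      (fun (st : Int × Int) (i : Int) =>
        let filters := if growth_factor ≠ 1 then initial_filters * growth_factor ^ i.toNat else st.2
        let spatial := if pool then PySem.Int.floordiv st.1 2 else st.1
        (spatial, filters))
      (input_size, initial_filters)
    = ((if pool ∧ m ≠ 0 then PySem.Int.floordiv input_size (2 ^ m : Int) else input_size),
       (if m = 0 ∨ growth_factor = 1 then initial_filters else initial_filters * growth_factor ^ (m - 1))) := by
  induction m with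
  | zero =>
      rw [Nat.cast_zero, PySem.List.pyRange_one_eq_nil (by omega : (0:Int) ≤ 0)]
      simp
  | succ k ih =>
      have hsp : ((k+1 : Nat) : Int) = ((k : Int) + 1) := by push_cast; ring
      have hr : PySem.List.pyRange 0 ((k+1 : Nat) : Int) 1
          = PySem.List.pyRange 0 (k : Int) 1 ++ [(k : Int)] := by
        have h0k : (0:Int) ≤ (k:Int) := by exact_mod_cast Nat.zero_le k
        rw [hsp]
        exact PySem.List.pyRange_one_succ_right h0k
      rw [hr, List.foldl_append, ih]
      simp only [List.foldl_cons, List.foldl_nil, Int.toNat_natCast, Prod.mk.injEq]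
      constructor
      · -- spatial component
        by_cases hp : pool
        · rcases Nat.eq_zero_or_pos k with hk | hk
          · simp [hp, hk, pow_one]
          · have hk0 : k ≠ 0 := by omega
            simp only [hp, hk0, not_false_eq_true, and_self, if_true, ne_eq,
              Nat.succ_ne_zero]
            rw [floordiv_floordiv_two _ _ (by positivity)]
            congr 1
            rw [pow_succ, Int.mul_comm]
        · simp [hp]
      · -- filters component
        by_cases hg : growth_factor = 1
        · simp [hg]
        · simp [hg]

-- ===== VERDICT (by name: the statement is the Claim_ definition above) =====
theorem calculate_output_size_spec : Claim_equal_calculate_output_size := by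
  intro input_size n initial_filters growth_factor pool _
  unfold Spec_calculate_output_size calculate_output_size calculate_output_size_alt
  by_cases hn : n ≤ 0
  · rw [PySem.List.pyRange_one_eq_nil hn]
    simp [hn, not_lt.mpr hn]
  · have hn : 0 < n := by omega
    have hcast : n = ((n.toNat : Nat) : Int) := (Int.toNat_of_nonneg (le_of_lt hn)).symm
    rw [hcast, loopA_char]
    have hnt : n.toNat ≠ 0 := by omega
    simp only [hnt, false_or, ne_eq, not_false_eq_true, and_true, ← hcast, Prod.mk.injEq]
    constructor
    · by_cases hg : growth_factor = 1
      · simp [hg]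
      · have h1 : (n - 1).toNat = n.toNat - 1 := by omega
        simp [hg, not_le.mpr hn, h1]
    · by_cases hp : pool <;> simp [hp, hn]
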